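-- pv_equiv track=rewrite | github.com/sebpeck/reRoute_Dynamics | src/reRoute_Dynamics/.ipynb_checkpoints/Geography_Tools-checkpoint.py | repeat_id_remover
-- ===== SOURCE A (Python) =====
-- def repeat_id_remover(sequence):
--     """repeat_id_remover takes an iterable of IDs where -1 is invalid,
--     and swaps out any repeat index with an invalid.
--
--     :param sequence: A sequence of id values in an iterable.
--
--     :return: Sequence with repeated values swapped for a -1.
--     """
--
--     # start the sequence with invalid
--     sequence_value = -1
--
--     # build a list for the new sequence
--     new_sequence = sequence
--
--     # creaate a history
--     his = set([])
--
--     # loop through each element in the sequence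
--     for idx, ele in enumerate(new_sequence):
--
--         # if the element is in the history,
--         if ele in his:
--             # swap the index with the sequence value
--             new_sequence[idx] = sequence_value
--
--         # then, add the element to the history.
--         his.add(ele)
--
--
--     # return the new sequence
--     return new_sequence
-- ===== SOURCE B (Python) =====
-- def repeat_id_remover(sequence):
--     """Replace repeated IDs with -1, in place, in two staged passes.
--
--     Pass 1 builds a table mapping each value to the index of its first
--     occurrence; pass 2 overwrites every position that is not its value's
--     first occurrence with -1. Same in-place mutation and return as A.
--     """
--     first = {}
--     for idx, ele in enumerate(sequence):
--         first.setdefault(ele, idx)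
--     for idx, ele in enumerate(sequence):
--         if first[ele] != idx:
--             sequence[idx] = -1
--     return sequence
-- ===== Notes on version B (the rewrite author's own statement) =====
-- stated objective: alternative
-- what changed: B replaces A's single pass with a running history set by two staged passes: pass 1 builds a first-occurrence index table (dict via setdefault), pass 2 writes -1 at every index that is not its value's first-occurrence index; in-place mutation and return value coincide with A.
import Mathlib
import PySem

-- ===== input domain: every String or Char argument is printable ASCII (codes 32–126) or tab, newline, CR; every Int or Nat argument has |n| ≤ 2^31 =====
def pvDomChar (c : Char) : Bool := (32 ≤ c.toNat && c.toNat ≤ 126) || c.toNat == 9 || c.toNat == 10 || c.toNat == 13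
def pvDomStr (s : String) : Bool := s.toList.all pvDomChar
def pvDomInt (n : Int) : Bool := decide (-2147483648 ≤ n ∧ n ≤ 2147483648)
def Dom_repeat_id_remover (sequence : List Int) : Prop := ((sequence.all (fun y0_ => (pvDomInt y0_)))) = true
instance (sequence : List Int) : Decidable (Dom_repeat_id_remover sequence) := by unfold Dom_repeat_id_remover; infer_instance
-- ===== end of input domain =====

-- B replaces A's single pass with a history set by two staged passes (a first-occurrence
-- index table, then a rewrite pass); same in-place mutation and same return value.

-- ===== PORT A =====
-- A mutates new_sequence (= sequence) in place, but each element is read before any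
-- write at its index, so the values enumerate yields are the ORIGINAL elements;
-- the mutated list is the first state component, the history set the second.
def repeat_id_remover (sequence : List Int) : List Int :=
  ((PySem.List.enumerate sequence).foldl
    (fun (st : List Int × PySem.Set Int) (p : Int × Int) =>
      (if PySem.Set.contains st.2 p.2 then PySem.List.pySetD st.1 p.1 (-1) else st.1,
       PySem.Set.add st.2 p.2))
    (sequence, PySem.Set.empty)).1

-- ===== PORT B =====
-- Pass 1: first = {}; for idx, ele: first.setdefault(ele, idx).
-- Pass 2 mutates in place; each element is read at its own index before being
-- written, so the values enumerate yields are the original elements.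
-- first[ele] is `match … get?`; the none branch (Python KeyError) is unreachable,
-- since pass 1 inserted every element of the sequence.
def repeat_id_remover_alt (sequence : List Int) : List Int :=
  let first : PySem.Dict Int Int :=
    (PySem.List.enumerate sequence).foldl
      (fun (d : PySem.Dict Int Int) (p : Int × Int) => d.setdefault p.2 p.1)
      PySem.Dict.empty
  (PySem.List.enumerate sequence).foldl
    (fun (seq : List Int) (p : Int × Int) =>
      match first.get? p.2 with
      | some j => if j ≠ p.1 then PySem.List.pySetD seq p.1 (-1) else seq
      | none => seq)
    sequence

-- ===== PRECONDITION & SPEC =====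
def Spec_repeat_id_remover (sequence : List Int) (out : List Int) : Prop := out = repeat_id_remover_alt sequence
instance (sequence : List Int) (out : List Int) : Decidable (Spec_repeat_id_remover sequence out) := by unfold Spec_repeat_id_remover; infer_instance

-- ===== CLAIM (what is proved, stated in full; the proofs are below) =====
def Claim_equal_repeat_id_remover : Prop := ∀ (sequence : List Int), Dom_repeat_id_remover sequence → Spec_repeat_id_remover sequence (repeat_id_remover sequence)

-- ===== LEMMAS AND PROOFS =====

-- functional form of A's loop
def markA (his : PySem.Set Int) : List Int → List Int
  | [] => []
  | x :: xs => (if PySem.Set.contains his x then (-1 : Int) else x) :: markA (PySem.Set.add his x) xs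

-- functional form of B's second pass, given the first-occurrence dict
def markB (d : PySem.Dict Int Int) (i : Int) : List Int → List Int
  | [] => []
  | x :: xs =>
      (match d.get? x with
       | some j => if j ≠ i then (-1 : Int) else x
       | none => x) :: markB d (i + 1) xs

-- index of the first occurrence of x in a list, counting from s
def firstIdx (x : Int) : List Int → Int → Option Int
  | [], _ => none
  | y :: ys, s => if y = x then some s else firstIdx x ys (s + 1)

theorem foldA (rest : List Int) : ∀ (pre : List Int) (his : PySem.Set Int),
    (PySem.List.enumerate rest (pre.length : Int)).foldl
      (fun (st : List Int × PySem.Set Int) (p : Int × Int) =>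
        (if PySem.Set.contains st.2 p.2 then PySem.List.pySetD st.1 p.1 (-1) else st.1,
         PySem.Set.add st.2 p.2))
      (pre ++ rest, his)
    = (pre ++ markA his rest, rest.foldl PySem.Set.add his) := by
  induction rest with
  | nil => intro pre his; simp [markA]
  | cons x xs ih =>
      intro pre his
      rw [PySem.List.enumerate_cons]
      have hstep :
          (if PySem.Set.contains his x then
              PySem.List.pySetD (pre ++ x :: xs) (pre.length : Int) (-1)
           else pre ++ x :: xs)
          = pre ++ (if PySem.Set.contains his x then (-1 : Int) else x) :: xs := by
        cases PySem.Set.contains his x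
        · simp
        · simp

      simp only [List.foldl_cons, hstep]
      have hlen : (pre.length : Int) + 1
          = (((pre ++ [if PySem.Set.contains his x then (-1 : Int) else x]).length : Nat) : Int) := by
        simp
      rw [hlen]
      have := ih (pre ++ [if PySem.Set.contains his x then (-1 : Int) else x]) (PySem.Set.add his x)
      simp only [List.append_assoc, List.singleton_append] at this
      rw [this]
      simp [markA]

-- B's pass-1 fold computes the first index of each key
theorem fold_setdefault (rest : List Int) : ∀ (s : Int) (d : PySem.Dict Int Int) (x : Int),
    ((PySem.List.enumerate rest s).foldl
      (fun (d : PySem.Dict Int Int) (p : Int × Int) => d.setdefault p.2 p.1) d).get? x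
    = (d.get? x).or (firstIdx x rest s) := by
  induction rest with
  | nil => intro s d x; simp [firstIdx]
  | cons y ys ih =>
      intro s d x
      rw [PySem.List.enumerate_cons]
      simp only [List.foldl_cons]
      rw [ih]
      by_cases h : y = x
      · subst h
        rw [PySem.Dict.get?_setdefault_self]
        simp only [firstIdx, if_pos]
        cases hd : d.get? y <;> simp
      · rw [PySem.Dict.get?_setdefault_of_ne d s (Ne.symm h)]
        simp [firstIdx, h]

theorem foldB (d : PySem.Dict Int Int) (rest : List Int) : ∀ (pre : List Int),
    (PySem.List.enumerate rest (pre.length : Int)).foldl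
      (fun (seq : List Int) (p : Int × Int) =>
        match d.get? p.2 with
        | some j => if j ≠ p.1 then PySem.List.pySetD seq p.1 (-1) else seq
        | none => seq)
      (pre ++ rest)
    = pre ++ markB d (pre.length : Int) rest := by
  induction rest with
  | nil => intro pre; simp [markB]
  | cons x xs ih =>
      intro pre
      rw [PySem.List.enumerate_cons]
      have hstep :
          (match d.get? x with
           | some j => if j ≠ (pre.length : Int) then PySem.List.pySetD (pre ++ x :: xs) (pre.length : Int) (-1) else pre ++ x :: xs
           | none => pre ++ x :: xs)
          = pre ++ (match d.get? x with
                    | some j => if j ≠ (pre.length : Int) then (-1 : Int) else x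
                    | none => x) :: xs := by
        cases hd : d.get? x with
        | none => rfl
        | some j =>
            by_cases hj : j = (pre.length : Int)
            · simp [hj]
            · simp [hj]
      simp only [List.foldl_cons, hstep]
      have hlen : (pre.length : Int) + 1
          = (((pre ++ [match d.get? x with
                       | some j => if j ≠ (pre.length : Int) then (-1 : Int) else x
                       | none => x]).length : Nat) : Int) := by
        simp
      rw [hlen]
      have := ih (pre ++ [match d.get? x with
                          | some j => if j ≠ (pre.length : Int) then (-1 : Int) else x
                          | none => x])
      simp only [List.append_assoc, List.singleton_append] at this
      rw [this]
      simp [markB]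

theorem firstIdx_isSome_iff (x : Int) (l : List Int) : ∀ s, (firstIdx x l s).isSome ↔ x ∈ l := by
  induction l with
  | nil => simp [firstIdx]
  | cons y ys ih =>
      intro s
      by_cases h : y = x
      · simp [firstIdx, h]
      · simp [firstIdx, h, ih (s + 1), Ne.symm h]

theorem firstIdx_bounds (x : Int) (l : List Int) : ∀ s j, firstIdx x l s = some j → s ≤ j ∧ j < s + l.length := by
  induction l with
  | nil => intro s j h; simp [firstIdx] at h
  | cons y ys ih =>
      intro s j h
      by_cases hy : y = x
      · simp [firstIdx, hy] at h
        subst h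
        simp only [List.length_cons]
        push_cast
        omega
      · simp [firstIdx, hy] at h
        have := ih (s + 1) j h
        constructor <;> [omega; (simp; omega)]

theorem firstIdx_append (x : Int) (l : List Int) : ∀ (r : List Int) (s : Int),
    firstIdx x (l ++ r) s = (firstIdx x l s).or (firstIdx x r (s + l.length)) := by
  induction l with
  | nil => intro r s; simp [firstIdx]
  | cons y ys ih =>
      intro r s
      by_cases h : y = x
      · simp [firstIdx, h]
      · simp only [List.cons_append, firstIdx, if_neg h]
        rw [ih]
        have h2 : s + 1 + (ys.length : Int) = s + ((y :: ys).length : Int) := by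
          push_cast [List.length_cons]
          omega
        rw [h2]

-- the pointwise agreement of the two mark functions, walking the original sequence
theorem markA_eq_markB (d : PySem.Dict Int Int) (seq : List Int)
    (hd : ∀ x, d.get? x = firstIdx x seq 0) :
    ∀ (rest pre : List Int) (his : PySem.Set Int),
    seq = pre ++ rest → (∀ y, PySem.Set.contains his y = true ↔ y ∈ pre) →
    markA his rest = markB d (pre.length : Int) rest := by
  intro rest
  induction rest with
  | nil => intro pre his _ _; rfl
  | cons x xs ih =>
      intro pre his hseq hhis
      have hget : d.get? x = firstIdx x seq 0 := hd x
      have hhead : (if PySem.Set.contains his x then (-1 : Int) else x)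
          = (match d.get? x with
             | some j => if j ≠ (pre.length : Int) then (-1 : Int) else x
             | none => x) := by
        rw [hget, hseq, firstIdx_append]
        by_cases hx : x ∈ pre
        · obtain ⟨j, hj⟩ := Option.isSome_iff_exists.mp ((firstIdx_isSome_iff x pre 0).mpr hx)
          have hb := firstIdx_bounds x pre 0 j hj
          rw [hj]
          simp only [Option.some_or]
          have : PySem.Set.contains his x = true := (hhis x).mpr hx
          rw [this]
          simp only [if_pos (by omega : j ≠ (pre.length : Int))]
          simp
        · have h1 : firstIdx x pre 0 = none := by
            cases h : firstIdx x pre 0 with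
            | none => rfl
            | some j => exact absurd ((firstIdx_isSome_iff x pre 0).mp (by simp [h])) hx
          have h2 : firstIdx x (x :: xs) (0 + (pre.length : Int)) = some (pre.length : Int) := by
            simp [firstIdx]
          rw [h1, h2]
          have : PySem.Set.contains his x = false := by
            cases h : PySem.Set.contains his x
            · rfl
            · exact absurd ((hhis x).mp h) hx
          rw [this]
          simp
      have htail := ih (pre ++ [x]) (PySem.Set.add his x) (by rw [hseq]; simp)
        (by
          intro y
          rw [PySem.Set.contains_iff, PySem.Set.mem_add]
          have hy := hhis y
          rw [PySem.Set.contains_iff] at hy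
          simp [hy])
      have hlen : (((pre ++ [x]).length : Nat) : Int) = (pre.length : Int) + 1 := by simp
      rw [hlen] at htail
      simp only [markA, markB, hhead, htail]

-- ===== VERDICT (by name: the statement is the Claim_ definition above) =====
theorem repeat_id_remover_spec : Claim_equal_repeat_id_remover := by
  intro sequence _
  unfold Spec_repeat_id_remover repeat_id_remover repeat_id_remover_alt
  have hA := foldA sequence [] PySem.Set.empty
  have hd : ∀ x, ((PySem.List.enumerate sequence).foldl
      (fun (d : PySem.Dict Int Int) (p : Int × Int) => d.setdefault p.2 p.1)
      PySem.Dict.empty).get? x = firstIdx x sequence 0 := by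
    intro x
    rw [show PySem.List.enumerate sequence = PySem.List.enumerate sequence 0 from rfl,
        fold_setdefault]
    simp [PySem.Dict.get?_empty]
  have hB := foldB ((PySem.List.enumerate sequence).foldl
      (fun (d : PySem.Dict Int Int) (p : Int × Int) => d.setdefault p.2 p.1)
      PySem.Dict.empty) sequence []
  simp only [List.nil_append, List.length_nil, Nat.cast_zero] at hA hB
  rw [hA, hB]
  show markA PySem.Set.empty sequence = markB _ 0 sequence
  have := markA_eq_markB _ sequence hd sequence [] PySem.Set.empty (by simp) (by simp [PySem.Set.empty, PySem.Set.contains])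
  simpa using this
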